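/- GENERATED by farm/mkstatement.py from design/units.tsv (unit `vorbis_decode_packet_rest.2b`) and the assertions of Vorbis/Spec/PacketRest2.lean — do not edit.
   THE STATEMENT of the proof unit `vorbis_decode_packet_rest.2b`: segment 2b of `vorbis_decode_packet_rest` (23 instructions; entries 0x111393;
   exits 0x1112b5,0x111403; ranges 0x111393-0x1113fe)
   takes each of its entry assertions to one of its exit assertions (`Vorbis.Spec.vorbis_decode_packet_rest.Seg2b`), given the contracts of its callees.
   What the names mean: Vorbis/Spec/Basic.lean (the shared hypotheses), Vorbis/Spec/PacketRest2.lean (the assertions). The theorem to prove: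
   `theorem vorbis_decode_packet_rest_2b_ok : Vorbis.Spec.vorbis_decode_packet_rest_2b.Statement`. -/
import Vorbis.Spec.Leaves2
import Vorbis.Spec.PacketRest2
import Vorbis.Spec.Reader
namespace Vorbis.Spec.vorbis_decode_packet_rest_2b
open X86 X86.User Asan

/-- The statement of unit `vorbis_decode_packet_rest.2b`. -/
def Statement : Prop :=
  ∀ (Lay : Layout) (_hLay : Lay.hi = 0x1000000) (μ : Microarch) (_hμ : UserX.MicroOK μ) (u₀ : State)
    (_hcode : HasCodeNat Lay u₀ Vorbis.L.vorbis_decode_packet_rest.entry Vorbis.Code.code_vorbis_decode_packet_rest.nat Vorbis.L.vorbis_decode_packet_rest.size)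
    (_h_asan_load4_noabort : Asan.SmallCheck Lay μ Vorbis.WayInv (Vorbis.CodeOK u₀) [.rax, .rcx, .rdx] 4 Vorbis.L.__asan_load4_noabort.entry)
    (_h_asan_load8_noabort : Asan.SmallCheck Lay μ Vorbis.WayInv (Vorbis.CodeOK u₀) [.rax, .rcx, .rdx] 8 Vorbis.L.__asan_load8_noabort.entry)
    (_h_asan_load1_noabort : Asan.SmallCheck Lay μ Vorbis.WayInv (Vorbis.CodeOK u₀) [.rax, .rdx] 1 Vorbis.L.__asan_load1_noabort.entry)
    (_h_get_bits : ∀ (others : List Obj) (frames : List (Nat × FrameLayout)) (Blk : Block → Prop) (len : Nat), Calls Lay μ Vorbis.WayInv (Vorbis.conv u₀) Vorbis.L.get_bits.entry (Vorbis.Spec.get_bits.spec others frames Blk len))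
    (_h_ilog : ∀ (others : List Obj) (frames : List (Nat × FrameLayout)), Calls Lay μ Vorbis.WayInv (Vorbis.conv u₀) Vorbis.L.ilog.entry (Vorbis.Spec.ilog.spec others frames)),
    Vorbis.Spec.vorbis_decode_packet_rest.Seg2b Lay μ u₀

end Vorbis.Spec.vorbis_decode_packet_rest_2b
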